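-- pv_equiv track=rewrite | github.com/llouis0622/Algorithm_Deep_Dive | Baekjoon/Gold/IV/BOJ9019.py | BFS
-- ===== SOURCE A (Python) =====
-- from collections import deque
--
-- def BFS(s, t):
--     queue = deque([(s, "")])
--     visited = [False] * 10000
--     visited[s] = True
--     while queue:
--         cur, num = queue.popleft()
--         if cur == t:
--             return num
--         next = (cur * 2) % 10000
--         if not visited[next]:
--             visited[next] = True
--             queue.append((next, num + "D"))
--         next = (cur - 1) % 10000 if cur != 0 else 9999
--         if not visited[next]:
--             visited[next] = True
--             queue.append((next, num + "S"))
--         next = (cur % 1000) * 10 + cur // 1000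
--         if not visited[next]:
--             visited[next] = True
--             queue.append((next, num + "L"))
--         next = (cur % 10) * 1000 + cur // 10
--         if not visited[next]:
--             visited[next] = True
--             queue.append((next, num + "R"))
-- ===== SOURCE B (Python) =====
-- from collections import deque
--
-- def BFS(s, t):
--     # BFS storing parent/op pointers per state; the command string is rebuilt
--     # once at the end instead of being copied along every queue entry.
--     parent = [-1] * 10000
--     op = [''] * 10000
--     parent[s] = s
--     queue = deque([s])
--     while queue:
--         cur = queue.popleft()
--         if cur == t:
--             path = []
--             x = t
--             while x != s:
--                 path.append(op[x])
--                 x = parent[x]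
--             return ''.join(reversed(path))
--         for nxt, o in ((cur * 2) % 10000, 'D'), \
--                       ((cur - 1) % 10000 if cur != 0 else 9999, 'S'), \
--                       ((cur % 1000) * 10 + cur // 1000, 'L'), \
--                       ((cur % 10) * 1000 + cur // 10, 'R'):
--             if parent[nxt] < 0:
--                 parent[nxt] = cur
--                 op[nxt] = o
--                 queue.append(nxt)
-- ===== Notes on version B (the rewrite author's own statement) =====
-- stated objective: alternative
-- what changed: BFS carries only state ids in the queue and records parent/op pointer arrays, reconstructing the command string once at the end, instead of copying a growing command string into every queue entry
-- outside the precondition, e.g. on BFS(-1, 0): A returns 'RDRDRDRSDDD', B does not finish within the time limit; on BFS(3, 10000): A returns None, B returns None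
import Mathlib
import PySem

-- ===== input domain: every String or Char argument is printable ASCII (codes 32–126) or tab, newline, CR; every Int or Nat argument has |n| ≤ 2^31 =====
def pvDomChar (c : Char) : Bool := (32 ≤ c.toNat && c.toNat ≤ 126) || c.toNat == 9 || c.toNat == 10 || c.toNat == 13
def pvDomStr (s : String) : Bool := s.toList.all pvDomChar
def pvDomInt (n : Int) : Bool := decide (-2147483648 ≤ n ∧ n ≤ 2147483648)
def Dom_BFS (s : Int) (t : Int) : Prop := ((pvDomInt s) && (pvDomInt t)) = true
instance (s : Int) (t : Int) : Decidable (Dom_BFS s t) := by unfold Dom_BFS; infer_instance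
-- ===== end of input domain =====

-- B replaces A's per-queue-entry command strings by parent/op pointer arrays and
-- rebuilds the command string once at the end (alternative algorithm; return value only).

-- ===== PORT A =====
-- visited[i] read (index nonnegative and in range on all reachable states under Pre_)
def vgetA (v : List Bool) (i : Int) : Bool := PySem.List.pyGetD v i false

-- one 'if not visited[next]: mark and append' block of A, exactly in sequence
def stepA (num : String) (st : List (Int × String) × List Bool) (n : Int) (c : String) :
    List (Int × String) × List Bool :=
  if vgetA st.2 n then st
  else (st.1 ++ [(n, num ++ c)], PySem.List.pySetD st.2 n true)

-- the while-loop of A; fuel only makes the recursion structural (pops are bounded by 10001 < 20001)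
def loopA (t : Int) : Nat → List (Int × String) → List Bool → String
  | 0, _, _ => ""
  | _ + 1, [], _ => ""
  | f + 1, (cur, num) :: rest, vis =>
    if cur = t then num
    else
      let st1 := stepA num (rest, vis) (PySem.Int.mod (cur * 2) 10000) "D"
      let st2 := stepA num st1 (if cur ≠ 0 then PySem.Int.mod (cur - 1) 10000 else 9999) "S"
      let st3 := stepA num st2 (PySem.Int.mod cur 1000 * 10 + PySem.Int.floordiv cur 1000) "L"
      let st4 := stepA num st3 (PySem.Int.mod cur 10 * 1000 + PySem.Int.floordiv cur 10) "R"
      loopA t f st4.1 st4.2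

def BFS (s : Int) (t : Int) : String :=
  loopA t 20001 [(s, "")] (PySem.List.pySetD (List.replicate 10000 false) s true)

-- ===== PORT B =====
-- parent[i] read (default irrelevant under Pre_: all reads are in range)
def pgetB (p : List Int) (i : Int) : Int := PySem.List.pyGetD p i (-1)
def ogetB (o : List String) (i : Int) : String := PySem.List.pyGetD o i ""

-- the literal 4-tuple of (next, letter) pairs B's for-loop iterates over
def nbrsB (cur : Int) : List (Int × String) :=
  [(PySem.Int.mod (cur * 2) 10000, "D"),
   (if cur ≠ 0 then PySem.Int.mod (cur - 1) 10000 else 9999, "S"),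
   (PySem.Int.mod cur 1000 * 10 + PySem.Int.floordiv cur 1000, "L"),
   (PySem.Int.mod cur 10 * 1000 + PySem.Int.floordiv cur 10, "R")]

-- B's reconstruction while-loop (x = t; while x != s: path.append(op[x]); x = parent[x]);
-- fuel makes it structural, 10001 > any parent-chain length, none is unreachable under Pre_
def reconB (par : List Int) (ops : List String) (s : Int) : Nat → Int → Option (List String)
  | 0, _ => none
  | f + 1, x =>
    if x = s then some []
    else (reconB par ops s f (pgetB par x)).map (fun r => ogetB ops x :: r)

-- one 'if parent[nxt] < 0: record and append' step of B's for-loop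
def stepB (cur : Int) (st : List Int × List Int × List String) (no : Int × String) :
    List Int × List Int × List String :=
  if pgetB st.2.1 no.1 < 0 then
    (st.1 ++ [no.1], PySem.List.pySetD st.2.1 no.1 cur, PySem.List.pySetD st.2.2 no.1 no.2)
  else st

-- the while-loop of B, same fuel discipline as loopA
def loopB (s t : Int) : Nat → List Int → List Int → List String → String
  | 0, _, _, _ => ""
  | _ + 1, [], _, _ => ""
  | f + 1, cur :: rest, par, ops =>
    if cur = t then PySem.Str.join "" ((reconB par ops s 10001 t).getD []).reverse
    else
      let st := (nbrsB cur).foldl (stepB cur) (rest, par, ops)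
      loopB s t f st.1 st.2.1 st.2.2

def BFS_alt (s : Int) (t : Int) : String :=
  loopB s t 20001 [s] (PySem.List.pySetD (List.replicate 10000 (-1)) s s) (List.replicate 10000 "")

-- ===== PRECONDITION & SPEC =====
-- Pre_ excludes s outside [0,10000) (A raises IndexError, or returns a value only through
-- Python's negative-index wraparound, where B's reconstruction loop does not terminate) and
-- t outside [0,10000) (A's loop exhausts and A falls off returning None, not a string).
def Pre_BFS (s : Int) (t : Int) : Prop := (0 ≤ s ∧ s < 10000) ∧ (0 ≤ t ∧ t < 10000)
instance (s : Int) (t : Int) : Decidable (Pre_BFS s t) := by unfold Pre_BFS; infer_instance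
def pvWitness_BFS : Int × Int := (1234, 3412)

def Spec_BFS (s : Int) (t : Int) (out : String) : Prop := out = BFS_alt s t
instance (s : Int) (t : Int) (out : String) : Decidable (Spec_BFS s t out) := by unfold Spec_BFS; infer_instance

-- ===== CLAIM (what is proved, stated in full; the proofs are below) =====
def Claim_equal_BFS : Prop := ∀ (s : Int) (t : Int), Dom_BFS s t → Pre_BFS s t → Spec_BFS s t (BFS s t)

-- ===== LEMMAS AND PROOFS =====

-- the Boolean visited array A maintains, as a function of B's parent array
def visB (par : List Int) : List Bool := par.map (fun v => decide (0 ≤ v))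
-- number of visited states
def cntB (par : List Int) : Nat := par.countP (fun v => decide (0 ≤ v))

-- parent-array invariant: s is visited, every visited state's parent is visited and in range,
-- and rk is a ranking certifying the parent chains are acyclic and shorter than cntB
def GInv (s : Int) (rk : Int → Nat) (par : List Int) (ops : List String) : Prop :=
  par.length = 10000 ∧ ops.length = 10000 ∧ (0 ≤ s ∧ s < 10000) ∧ 0 ≤ pgetB par s ∧
  (∀ x, 0 ≤ x → x < 10000 → 0 ≤ pgetB par x → x ≠ s →
      (0 ≤ pgetB par x ∧ pgetB par x < 10000) ∧ 0 ≤ pgetB par (pgetB par x) ∧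
      rk (pgetB par x) < rk x) ∧
  (∀ x, 0 ≤ x → x < 10000 → 0 ≤ pgetB par x → rk x < cntB par)

-- queue invariant: B's queue entries are A's without the string, and for each entry the
-- reconstruction from B's arrays yields exactly A's carried string
def EOk (s : Int) (rk : Int → Nat) (par : List Int) (ops : List String)
    (q : List (Int × String)) : Prop :=
  ∀ e ∈ q, (0 ≤ e.1 ∧ e.1 < 10000) ∧ 0 ≤ pgetB par e.1 ∧
    ∃ L, reconB par ops s (rk e.1 + 1) e.1 = some L ∧ PySem.Str.join "" L.reverse = e.2

theorem nil_intercalate (L : List (List Char)) : ([] : List Char).intercalate L = L.flatten := by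
  induction L with
  | nil => rfl
  | cons h t ih =>
    cases t with
    | nil => simp [List.intercalate]
    | cons a b =>
      simp only [List.intercalate, List.intersperse] at *
      simp_all [List.flatten]

theorem join_snoc (L : List String) (c : String) :
    PySem.Str.join "" (L ++ [c]) = PySem.Str.join "" L ++ c := by
  simp [PySem.Str.join, PySem.Chars.join, nil_intercalate, String.ofList_append]

theorem pyGetD_pySetD_ne {α : Type} (l : List α) {i j : Int} (v d : α)
    (h0 : 0 ≤ i) (h1 : 0 ≤ j) (hne : j ≠ i) :
    PySem.List.pyGetD (PySem.List.pySetD l i v) j d = PySem.List.pyGetD l j d := by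
  obtain ⟨iN, rfl⟩ : ∃ m : Nat, i = (m : Int) := ⟨i.toNat, (Int.toNat_of_nonneg h0).symm⟩
  obtain ⟨jN, rfl⟩ : ∃ m : Nat, j = (m : Int) := ⟨j.toNat, (Int.toNat_of_nonneg h1).symm⟩
  have hne' : jN ≠ iN := by omega
  simp [PySem.List.pySetD_natCast, PySem.List.pyGetD_natCast, List.getD,
    List.getElem?_set_ne hne'.symm]

theorem pyGetD_pySetD_self {α : Type} (l : List α) {i : Int} (v d : α)
    (h0 : 0 ≤ i) (h1 : i < (l.length : Int)) :
    PySem.List.pyGetD (PySem.List.pySetD l i v) i d = v := by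
  obtain ⟨iN, rfl⟩ : ∃ m : Nat, i = (m : Int) := ⟨i.toNat, (Int.toNat_of_nonneg h0).symm⟩
  have h : iN < l.length := by omega
  rw [PySem.List.pyGetD_pySetD_natCast _ _ _ _ _ h]
  simp

theorem cnt_le (par : List Int) : cntB par ≤ par.length := List.countP_le_length

theorem cnt_set (par : List Int) {n : Int} (h0 : 0 ≤ n) (h1 : n < (par.length : Int))
    (hneg : pgetB par n < 0) {v : Int} (hv : 0 ≤ v) :
    cntB (PySem.List.pySetD par n v) = cntB par + 1 := by
  obtain ⟨nN, rfl⟩ : ∃ m : Nat, n = (m : Int) := ⟨n.toNat, (Int.toNat_of_nonneg h0).symm⟩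
  have h : nN < par.length := by omega
  have hold : par[nN] < 0 := by
    have := PySem.List.pyGetD_eq_getElem par (i := (nN : Int)) (-1) (by omega) h1
    simp only [Int.toNat_natCast] at this
    unfold pgetB at hneg
    omega
  unfold cntB
  rw [PySem.List.pySetD_natCast, List.countP_set h]
  simp [hv, Int.not_le.mpr hold]

theorem recon_mono {par : List Int} {ops : List String} {s : Int} :
    ∀ {f g : Nat}, f ≤ g → ∀ {x : Int} {L : List String},
      reconB par ops s f x = some L → reconB par ops s g x = some L := by
  intro f
  induction f with
  | zero => intro g _ x L h; simp [reconB] at h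
  | succ f ih =>
    intro g hg x L h
    obtain ⟨g', rfl⟩ : ∃ g', g = g' + 1 := ⟨g - 1, by omega⟩
    simp only [reconB] at h ⊢
    by_cases hx : x = s
    · simpa [hx] using h
    · simp only [hx, ite_false] at h ⊢
      obtain ⟨r, hr, rfl⟩ := Option.map_eq_some_iff.mp h
      exact Option.map_eq_some_iff.mpr ⟨r, ih (by omega) hr, rfl⟩

theorem recon_stable {s : Int} {rk : Int → Nat} {par : List Int} {ops : List String}
    (hG : GInv s rk par ops) {n : Int} (hn0 : 0 ≤ n) (_hn1 : n < 10000)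
    (hneg : pgetB par n < 0) (v : Int) (c : String) :
    ∀ (f : Nat) (x : Int), 0 ≤ x → x < 10000 → 0 ≤ pgetB par x →
      reconB (PySem.List.pySetD par n v) (PySem.List.pySetD ops n c) s f x
        = reconB par ops s f x := by
  intro f
  induction f with
  | zero => intro x _ _ _; rfl
  | succ f ih =>
    intro x hx0 hx1 hxv
    have hxn : x ≠ n := by intro h; rw [h] at hxv; omega
    simp only [reconB]
    by_cases hx : x = s
    · simp [hx]
    · have hpar : pgetB (PySem.List.pySetD par n v) x = pgetB par x :=
        pyGetD_pySetD_ne par v (-1) hn0 hx0 hxn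
      have hops : ogetB (PySem.List.pySetD ops n c) x = ogetB ops x :=
        pyGetD_pySetD_ne ops c "" hn0 hx0 hxn
      obtain ⟨-, -, -, -, hchain, -⟩ := hG
      obtain ⟨⟨hp0, hp1⟩, hpv, -⟩ := hchain x hx0 hx1 hxv hx
      rw [if_neg hx, if_neg hx, hpar, hops, ih (pgetB par x) hp0 hp1 hpv]

theorem step_sim {s cur : Int} {num : String} {Lc : List String}
    {rk : Int → Nat} {par : List Int} {ops : List String} {qA : List (Int × String)}
    (hG : GInv s rk par ops) (hq : EOk s rk par ops qA)
    (hcur0 : 0 ≤ cur) (hcur1 : cur < 10000) (hcurv : 0 ≤ pgetB par cur)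
    (hrec : reconB par ops s (rk cur + 1) cur = some Lc)
    (hnum : PySem.Str.join "" Lc.reverse = num)
    {n : Int} (hn0 : 0 ≤ n) (hn1 : n < 10000) (c : String) :
    ∃ rk',
      (stepA num (qA, visB par) n c).2
        = visB (stepB cur (qA.map Prod.fst, par, ops) (n, c)).2.1 ∧
      (stepB cur (qA.map Prod.fst, par, ops) (n, c)).1
        = ((stepA num (qA, visB par) n c).1).map Prod.fst ∧
      GInv s rk' (stepB cur (qA.map Prod.fst, par, ops) (n, c)).2.1
        (stepB cur (qA.map Prod.fst, par, ops) (n, c)).2.2 ∧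
      EOk s rk' (stepB cur (qA.map Prod.fst, par, ops) (n, c)).2.1
        (stepB cur (qA.map Prod.fst, par, ops) (n, c)).2.2
        (stepA num (qA, visB par) n c).1 ∧
      rk' cur = rk cur ∧
      0 ≤ pgetB (stepB cur (qA.map Prod.fst, par, ops) (n, c)).2.1 cur ∧
      reconB (stepB cur (qA.map Prod.fst, par, ops) (n, c)).2.1
        (stepB cur (qA.map Prod.fst, par, ops) (n, c)).2.2 s (rk cur + 1) cur = some Lc := by
  obtain ⟨hlp, hlo, ⟨hs0, hs1⟩, hsv, hchain, hbound⟩ := hG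
  have hguard : vgetA (visB par) n = decide (0 ≤ pgetB par n) := by
    have h := PySem.List.pyGetD_map (fun v : Int => decide (0 ≤ v)) par n (-1)
    norm_num at h
    unfold vgetA visB pgetB
    exact h
  by_cases hv : 0 ≤ pgetB par n
  · -- already visited: both steps leave everything unchanged
    have hgt : vgetA (visB par) n = true := by rw [hguard]; exact decide_eq_true hv
    simp only [stepA, stepB]
    rw [if_pos hgt, if_neg (Int.not_lt.mpr hv)]
    exact ⟨rk, rfl, rfl, ⟨hlp, hlo, ⟨hs0, hs1⟩, hsv, hchain, hbound⟩, hq, rfl, hcurv, hrec⟩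
  · -- fresh state: A appends (n, num ++ c), B records parent/op and appends n
    have hvneg : pgetB par n < 0 := by omega
    have hsn : n ≠ s := fun h => hv (h ▸ hsv)
    have hcn : cur ≠ n := fun h => hv (h ▸ hcurv)
    have hlen' : n < (par.length : Int) := by rw [hlp]; exact_mod_cast hn1
    have holen' : n < (ops.length : Int) := by rw [hlo]; exact_mod_cast hn1
    have hself : pgetB (PySem.List.pySetD par n cur) n = cur :=
      pyGetD_pySetD_self par cur (-1) hn0 hlen'
    have hoself : ogetB (PySem.List.pySetD ops n c) n = c :=
      pyGetD_pySetD_self ops c "" hn0 holen'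
    have hpne : ∀ x, 0 ≤ x → x ≠ n →
        pgetB (PySem.List.pySetD par n cur) x = pgetB par x :=
      fun x hx hxn => pyGetD_pySetD_ne par cur (-1) hn0 hx hxn
    have hcnt : cntB (PySem.List.pySetD par n cur) = cntB par + 1 :=
      cnt_set par hn0 hlen' hvneg hcur0
    have hstab := recon_stable (s := s) (rk := rk)
      ⟨hlp, hlo, ⟨hs0, hs1⟩, hsv, hchain, hbound⟩ hn0 hn1 hvneg cur c
    have hgf : ¬ vgetA (visB par) n = true := by
      rw [hguard]; simp [Int.not_le.mpr hvneg]
    refine ⟨fun x => if x = n then cntB par else rk x, ?_⟩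
    simp only [stepA, stepB]
    rw [if_neg hgf, if_pos hvneg]
    dsimp only
    refine ⟨?_, by simp, ⟨?_, ?_, ⟨hs0, hs1⟩, ?_, ?_, ?_⟩, ?_, ?_, ?_, ?_⟩
    · -- visited array of A stays the image of B's parent array
      unfold visB
      rw [PySem.List.pySetD_of_nonneg _ _ hn0, PySem.List.pySetD_of_nonneg _ _ hn0,
        List.map_set]
      norm_num [hcur0]
    · rw [PySem.List.length_pySetD]; exact hlp
    · rw [PySem.List.length_pySetD]; exact hlo
    · rw [hpne s hs0 hsn.symm]; exact hsv
    · -- parent chains stay acyclic, in range and ranked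
      intro x hx0 hx1 hxv hxs
      beta_reduce
      by_cases hxn : x = n
      · subst hxn
        rw [hself] at *
        refine ⟨⟨hcur0, hcur1⟩, ?_, ?_⟩
        · rw [hpne cur hcur0 hcn]; exact hcurv
        · rw [if_neg hcn, if_pos rfl]
          exact hbound cur hcur0 hcur1 hcurv
      · rw [hpne x hx0 hxn] at hxv ⊢
        obtain ⟨⟨hp0, hp1⟩, hpv, hrk⟩ := hchain x hx0 hx1 hxv hxs
        have hpn : pgetB par x ≠ n := fun h => hv (h ▸ hpv)
        rw [hpne _ hp0 hpn, if_neg hpn, if_neg hxn]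
        exact ⟨⟨hp0, hp1⟩, hpv, hrk⟩
    · -- ranks stay below the visited count
      intro x hx0 hx1 hxv
      beta_reduce
      rw [hcnt]
      by_cases hxn : x = n
      · rw [if_pos hxn]; omega
      · rw [hpne x hx0 hxn] at hxv
        rw [if_neg hxn]
        have := hbound x hx0 hx1 hxv
        omega
    · -- every queue entry still reconstructs to its carried string
      intro e he
      rcases List.mem_append.mp he with he | he
      · obtain ⟨⟨he0, he1⟩, hev, L, hL, hj⟩ := hq e he
        have hen : e.1 ≠ n := fun h => hv (h ▸ hev)
        beta_reduce
        rw [if_neg hen]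
        refine ⟨⟨he0, he1⟩, by rw [hpne e.1 he0 hen]; exact hev, L, ?_, hj⟩
        rw [hstab _ e.1 he0 he1 hev]
        exact hL
      · rcases List.mem_singleton.mp he with rfl
        refine ⟨⟨hn0, hn1⟩, by rw [hself]; exact hcur0, c :: Lc, ?_, ?_⟩
        · beta_reduce
          rw [if_pos rfl]
          simp only [reconB, if_neg hsn, hself, hoself]
          rw [hstab _ cur hcur0 hcur1 hcurv,
            recon_mono (f := rk cur + 1) (hbound cur hcur0 hcur1 hcurv) hrec]
          rfl
        · rw [List.reverse_cons, join_snoc, hnum]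
    · beta_reduce
      rw [if_neg hcn]
    · rw [hpne cur hcur0 hcn]; exact hcurv
    · rw [hstab _ cur hcur0 hcur1 hcurv]; exact hrec

theorem steps_sim {s cur : Int} {num : String} {Lc : List String} :
    ∀ (ns : List (Int × String)) (qA : List (Int × String)) (par : List Int)
      (ops : List String) (rk : Int → Nat),
      (∀ p ∈ ns, 0 ≤ p.1 ∧ p.1 < 10000) →
      GInv s rk par ops → EOk s rk par ops qA →
      0 ≤ cur → cur < 10000 → 0 ≤ pgetB par cur →
      reconB par ops s (rk cur + 1) cur = some Lc →
      PySem.Str.join "" Lc.reverse = num →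
      ∃ rk',
        (ns.foldl (fun st p => stepA num st p.1 p.2) (qA, visB par)).2
          = visB (ns.foldl (stepB cur) (qA.map Prod.fst, par, ops)).2.1 ∧
        (ns.foldl (stepB cur) (qA.map Prod.fst, par, ops)).1
          = ((ns.foldl (fun st p => stepA num st p.1 p.2) (qA, visB par)).1).map Prod.fst ∧
        GInv s rk' (ns.foldl (stepB cur) (qA.map Prod.fst, par, ops)).2.1
          (ns.foldl (stepB cur) (qA.map Prod.fst, par, ops)).2.2 ∧
        EOk s rk' (ns.foldl (stepB cur) (qA.map Prod.fst, par, ops)).2.1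
          (ns.foldl (stepB cur) (qA.map Prod.fst, par, ops)).2.2
          (ns.foldl (fun st p => stepA num st p.1 p.2) (qA, visB par)).1 := by
  intro ns
  induction ns with
  | nil =>
    intro qA par ops rk _ hG hq _ _ _ _ _
    exact ⟨rk, rfl, rfl, hG, hq⟩
  | cons p ns ih =>
    intro qA par ops rk hns hG hq hc0 hc1 hcv hrec hnum
    obtain ⟨rk1, hv1, hb1, hG1, hE1, hrk1, hcv1, hrec1⟩ :=
      step_sim hG hq hc0 hc1 hcv hrec hnum (hns p (List.mem_cons_self ..)).1
        (hns p (List.mem_cons_self ..)).2 p.2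
    simp only [List.foldl_cons]
    rw [show stepA num (qA, visB par) p.1 p.2
        = ((stepA num (qA, visB par) p.1 p.2).1,
           visB (stepB cur (qA.map Prod.fst, par, ops) (p.1, p.2)).2.1) from by
      rw [← hv1],
      show stepB cur (qA.map Prod.fst, par, ops) (p.1, p.2)
        = (((stepA num (qA, visB par) p.1 p.2).1).map Prod.fst,
           (stepB cur (qA.map Prod.fst, par, ops) (p.1, p.2)).2.1,
           (stepB cur (qA.map Prod.fst, par, ops) (p.1, p.2)).2.2) from by
      rw [← hb1]]
    rw [← hrk1] at hrec1
    exact ih _ _ _ rk1 (fun q hqm => hns q (List.mem_cons_of_mem _ hqm)) hG1 hE1 hc0 hc1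
      hcv1 hrec1 hnum

theorem nbr_range (cur : Int) (h0 : 0 ≤ cur) (h1 : cur < 10000) :
    ∀ p ∈ nbrsB cur, 0 ≤ p.1 ∧ p.1 < 10000 := by
  intro p hp
  simp only [nbrsB, List.mem_cons, List.not_mem_nil, or_false] at hp
  rcases hp with rfl | rfl | rfl | rfl
  · dsimp only
    rw [PySem.Int.mod_eq_emod_of_pos (by norm_num)]
    omega
  · dsimp only
    split_ifs with h
    · rw [PySem.Int.mod_eq_emod_of_pos (by norm_num)]
      omega
    · norm_num
  · dsimp only
    rw [PySem.Int.mod_eq_emod_of_pos (by norm_num),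
      PySem.Int.floordiv_eq_ediv_of_pos (by norm_num)]
    omega
  · dsimp only
    rw [PySem.Int.mod_eq_emod_of_pos (by norm_num),
      PySem.Int.floordiv_eq_ediv_of_pos (by norm_num)]
    omega

theorem loop_sim (s t : Int) :
    ∀ (f : Nat) (qA : List (Int × String)) (par : List Int) (ops : List String)
      (rk : Int → Nat), GInv s rk par ops → EOk s rk par ops qA →
      loopA t f qA (visB par) = loopB s t f (qA.map Prod.fst) par ops := by
  intro f
  induction f with
  | zero => intro qA par ops rk _ _; cases qA <;> rfl
  | succ f ih =>
    intro qA par ops rk hG hq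
    cases qA with
    | nil => rfl
    | cons e rest =>
      obtain ⟨cur, num⟩ := e
      obtain ⟨⟨hc0, hc1⟩, hcv, Lc, hrec, hjoin⟩ := hq _ (List.mem_cons_self ..)
      try dsimp only at hc0 hc1 hcv hrec hjoin
      have hqrest : EOk s rk par ops rest := fun e he => hq e (List.mem_cons_of_mem _ he)
      simp only [List.map_cons, loopA, loopB]
      by_cases ht : cur = t
      · rw [if_pos ht, if_pos ht]
        subst ht
        have hfuel : rk cur + 1 ≤ 10001 := by
          have hb := hG.2.2.2.2.2 cur hc0 hc1 hcv
          have h2 := cnt_le par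
          have h3 : par.length = 10000 := hG.1
          omega
        rw [recon_mono hfuel hrec]
        simpa only [List.map_cons, List.map_nil] using hjoin.symm
      · rw [if_neg ht, if_neg ht]
        obtain ⟨rk4, hv4, hb4, hG4, hE4⟩ :=
          steps_sim (nbrsB cur) rest par ops rk (nbr_range cur hc0 hc1) hG hqrest hc0 hc1
            hcv hrec hjoin
        have hAfold : (nbrsB cur).foldl
            (fun (st : List (Int × String) × List Bool) p => stepA num st p.1 p.2)
            (rest, visB par)
            = stepA num (stepA num (stepA num (stepA num (rest, visB par)
                (PySem.Int.mod (cur * 2) 10000) "D")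
                (if cur ≠ 0 then PySem.Int.mod (cur - 1) 10000 else 9999) "S")
                (PySem.Int.mod cur 1000 * 10 + PySem.Int.floordiv cur 1000) "L")
                (PySem.Int.mod cur 10 * 1000 + PySem.Int.floordiv cur 10) "R" := by
          simp only [nbrsB, List.foldl_cons, List.foldl_nil]
        rw [← hAfold, hv4, hb4]
        exact ih _ _ _ rk4 hG4 hE4

-- ===== VERDICT (by name: the statement is the Claim_ definition above) =====
theorem BFS_spec : Claim_equal_BFS := by
  unfold Claim_equal_BFS
  intro s t _ hpre
  obtain ⟨⟨hs0, hs1⟩, ht0, ht1⟩ := hpre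
  unfold Spec_BFS BFS BFS_alt
  have hlen : ((List.replicate 10000 (-1) : List Int).length : Int) = 10000 := by
    rw [List.length_replicate]; norm_num
  have hrep : ∀ x : Int, 0 ≤ x → x < 10000 →
      pgetB (List.replicate 10000 (-1)) x = -1 := by
    intro x hx0 hx1
    unfold pgetB
    rw [PySem.List.pyGetD_eq_getElem _ _ hx0 (by rw [hlen]; exact hx1)]
    exact List.getElem_replicate ..
  have hselfs : pgetB (PySem.List.pySetD (List.replicate 10000 (-1)) s s) s = s :=
    pyGetD_pySetD_self _ s (-1) hs0 (by rw [hlen]; exact hs1)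
  have hcnt0 : cntB (List.replicate 10000 (-1) : List Int) = 0 := by
    unfold cntB
    rw [List.countP_eq_zero]
    intro a ha
    rw [List.mem_replicate] at ha
    simp [ha.2]
  have hcnt1 : cntB (PySem.List.pySetD (List.replicate 10000 (-1)) s s) = 1 := by
    rw [cnt_set _ hs0 (by rw [hlen]; exact hs1) (by rw [hrep s hs0 hs1]; norm_num) hs0,
      hcnt0]
  have hG0 : GInv s (fun _ => 0) (PySem.List.pySetD (List.replicate 10000 (-1)) s s)
      (List.replicate 10000 "") := by
    refine ⟨by rw [PySem.List.length_pySetD, List.length_replicate],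
      List.length_replicate .., ⟨hs0, hs1⟩,
      by rw [hselfs]; exact hs0, ?_, ?_⟩
    · intro x hx0 hx1 hxv hxs
      exfalso
      have hne : pgetB (PySem.List.pySetD (List.replicate 10000 (-1)) s s) x
          = pgetB (List.replicate 10000 (-1)) x := pyGetD_pySetD_ne _ s (-1) hs0 hx0 hxs
      rw [hne, hrep x hx0 hx1] at hxv
      omega
    · intro x _ _ _
      beta_reduce
      rw [hcnt1]
      omega
  have hE0 : EOk s (fun _ => 0) (PySem.List.pySetD (List.replicate 10000 (-1)) s s)
      (List.replicate 10000 "") [(s, "")] := by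
    intro e he
    rcases List.mem_singleton.mp he with rfl
    exact ⟨⟨hs0, hs1⟩, by rw [hselfs]; exact hs0, [], by rw [reconB, if_pos rfl], rfl⟩
  have hvis : PySem.List.pySetD (List.replicate 10000 false) s true
      = visB (PySem.List.pySetD (List.replicate 10000 (-1)) s s) := by
    unfold visB
    rw [PySem.List.pySetD_of_nonneg _ _ hs0, PySem.List.pySetD_of_nonneg _ _ hs0,
      List.map_set, List.map_replicate]
    norm_num [hs0]
  rw [hvis]
  have h := loop_sim s t 20001 [(s, "")]
    (PySem.List.pySetD (List.replicate 10000 (-1)) s s) (List.replicate 10000 "")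
    (fun _ => 0) hG0 hE0
  simpa only [List.map_cons, List.map_nil] using h
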